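-- pv_equiv track=rewrite | github.com/weathertopper/beat-grandma | beat-grandma.py | getBlankLetterPositions
-- ===== SOURCE A (Python) =====
-- def getBlankLetterPositions(blank_letters_to_play, letters_to_play):
--     blank_letter_positions  = dict()
--     for blank_letter in blank_letters_to_play:
--         blank_letter_positions[blank_letter] = []
--         for curr_pos in letters_to_play:
--             if letters_to_play[curr_pos] == blank_letter:
--                 blank_letter_positions[blank_letter].append(curr_pos)
--     return blank_letter_positions
-- ===== SOURCE B (Python) =====
-- def getBlankLetterPositions(blank_letters_to_play, letters_to_play):
--     # One pass over letters_to_play grouping positions by letter, then one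
--     # dict-comprehension pass over the blank letters.
--     groups = {}
--     for pos, letter in letters_to_play.items():
--         groups.setdefault(letter, []).append(pos)
--     return {bl: list(groups.get(bl, [])) for bl in blank_letters_to_play}
-- ===== Notes on version B (the rewrite author's own statement) =====
-- stated objective: faster
-- what changed: Replaces the per-blank-letter scan of the whole letters dict with a single grouping pass (letter -> list of positions) followed by one lookup per blank letter.
import Mathlib
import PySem

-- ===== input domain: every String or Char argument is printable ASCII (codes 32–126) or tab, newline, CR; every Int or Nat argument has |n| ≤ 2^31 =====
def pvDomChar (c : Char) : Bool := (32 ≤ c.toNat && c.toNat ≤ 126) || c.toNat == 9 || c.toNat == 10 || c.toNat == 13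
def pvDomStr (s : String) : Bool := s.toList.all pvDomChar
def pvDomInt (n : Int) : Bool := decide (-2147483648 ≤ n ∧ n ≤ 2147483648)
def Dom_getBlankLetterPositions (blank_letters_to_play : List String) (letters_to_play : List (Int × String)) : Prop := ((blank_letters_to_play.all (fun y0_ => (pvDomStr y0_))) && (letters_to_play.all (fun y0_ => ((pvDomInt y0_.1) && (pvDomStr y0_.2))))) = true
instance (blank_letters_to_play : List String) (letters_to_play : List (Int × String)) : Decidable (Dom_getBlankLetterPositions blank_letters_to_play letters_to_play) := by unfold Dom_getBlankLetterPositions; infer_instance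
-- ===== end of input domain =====

-- B replaces A's per-blank scan of the letters dict by one grouping pass plus per-blank lookups (objective: faster).

-- ===== PORT A =====
def getBlankLetterPositions (blank_letters_to_play : List String) (letters_to_play : List (Int × String)) : List (String × List Int) :=
  let L := PySem.Dict.ofList letters_to_play
  (blank_letters_to_play.foldl (fun d bl =>
      L.keys.foldl (fun d k =>
          if L.get? k == some bl then d.insert bl (d.getD bl [] ++ [k]) else d)
        (d.insert bl [])) PySem.Dict.empty).items

-- ===== PORT B =====
def getBlankLetterPositions_alt (blank_letters_to_play : List String) (letters_to_play : List (Int × String)) : List (String × List Int) :=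
  let L := PySem.Dict.ofList letters_to_play
  let groups := L.items.foldl (fun d p => d.modify p.2 [] (· ++ [p.1])) PySem.Dict.empty
  (blank_letters_to_play.foldl (fun d bl => d.insert bl (groups.getD bl [])) PySem.Dict.empty).items

-- ===== PRECONDITION & SPEC =====
def Spec_getBlankLetterPositions (blank_letters_to_play : List String) (letters_to_play : List (Int × String)) (out : List (String × List Int)) : Prop := out = getBlankLetterPositions_alt blank_letters_to_play letters_to_play
instance (blank_letters_to_play : List String) (letters_to_play : List (Int × String)) (out : List (String × List Int)) : Decidable (Spec_getBlankLetterPositions blank_letters_to_play letters_to_play out) := by unfold Spec_getBlankLetterPositions; infer_instance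

-- ===== CLAIM (what is proved, stated in full; the proofs are below) =====
def Claim_equal_getBlankLetterPositions : Prop := ∀ (blank_letters_to_play : List String) (letters_to_play : List (Int × String)), Dom_getBlankLetterPositions blank_letters_to_play letters_to_play → Spec_getBlankLetterPositions blank_letters_to_play letters_to_play (getBlankLetterPositions blank_letters_to_play letters_to_play)

-- ===== LEMMAS AND PROOFS =====

-- A's inner loop over the keys, started from a dict where bl was just assigned v, appends the matching keys to v.
lemma innerFold (bl : String) (P : Int → Bool) (ks : List Int) :
    ∀ (d : PySem.Dict String (List Int)) (v : List Int),
      ks.foldl (fun d k => if P k then d.insert bl (d.getD bl [] ++ [k]) else d) (d.insert bl v)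
        = d.insert bl (v ++ ks.filter P) := by
  induction ks with
  | nil => intro d v; simp
  | cons k ks ih =>
    intro d v
    by_cases h : P k
    · simp only [List.foldl_cons, h, if_pos, List.filter_cons_of_pos h,
        PySem.Dict.getD_insert_self, PySem.Dict.insert_insert_self]
      rw [ih d (v ++ [k])]
      simp
    · simp only [List.foldl_cons, h, if_neg, List.filter_cons_of_neg, Bool.not_eq_true]
      rw [ih d v]

-- B's grouping pass read back at bl yields exactly the keys of L whose value is bl.
lemma groupsGetD (L : PySem.Dict Int String) (bl : String) :
    (L.items.foldl (fun d p => d.modify p.2 [] (· ++ [p.1])) (PySem.Dict.empty : PySem.Dict String (List Int))).getD bl []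
      = (L.items.filter (fun p => p.2 == bl)).map (·.1) := by
  have h := PySem.Dict.getD_foldl_modify_append (l := L.items.map Prod.swap)
    (d := (PySem.Dict.empty : PySem.Dict String (List Int))) (c := bl)
  rw [List.foldl_map] at h
  simp only [Prod.swap] at h
  rw [h]
  simp [List.filter_map, List.map_map, Function.comp_def, Prod.swap]

-- A's per-blank filter over the keys equals B's grouped list, because get? on a nodup-keyed dict returns the paired value.
lemma valueEq (L : PySem.Dict Int String) (hnd : L.keys.Nodup) (bl : String) :
    L.keys.filter (fun k => L.get? k == some bl)
      = (L.items.filter (fun p => p.2 == bl)).map (·.1) := by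
  show (L.items.map (·.1)).filter (fun k => L.get? k == some bl) = _
  rw [List.filter_map]
  congr 1
  apply List.filter_congr
  intro p hp
  obtain ⟨k, v⟩ := p
  simp only [Function.comp_apply]
  rw [PySem.Dict.get?_of_mem_items L hp hnd]
  simp

-- ===== VERDICT (by name: the statement is the Claim_ definition above) =====
theorem getBlankLetterPositions_spec : Claim_equal_getBlankLetterPositions := by
  intro blanks letters _dom
  unfold Spec_getBlankLetterPositions getBlankLetterPositions getBlankLetterPositions_alt
  simp only []
  congr 1
  apply PySem.List.foldl_congr_mem
  intro d bl _
  rw [innerFold bl _ _ d []]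
  rw [List.nil_append, valueEq _ (PySem.Dict.nodup_keys_ofList letters), groupsGetD]
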